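-- pv_equiv track=rewrite | github.com/Kai-Gowers/EminemGPT | cleanlyrics.py | remove_bracketed_text
-- ===== SOURCE A (Python) =====
-- def remove_bracketed_text(text):
--     result = ''
--     inside_brackets = False
--
--     for c in text:
--         if c == '[':
--             inside_brackets = True
--         elif c == ']':
--             inside_brackets = False
--         elif not inside_brackets:
--             result += c
--
--     return result
-- ===== SOURCE B (Python) =====
-- def remove_bracketed_text(text):
--     return ''.join(part.partition('[')[0] for part in text.split(']'))
-- ===== Notes on version B (the rewrite author's own statement) =====
-- stated objective: faster
-- what changed: Replaced the per-character boolean state machine with two levels of string splitting: split at closing brackets, keep each segment's prefix before its first opening bracket, and join the kept prefixes.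
import Mathlib
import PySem

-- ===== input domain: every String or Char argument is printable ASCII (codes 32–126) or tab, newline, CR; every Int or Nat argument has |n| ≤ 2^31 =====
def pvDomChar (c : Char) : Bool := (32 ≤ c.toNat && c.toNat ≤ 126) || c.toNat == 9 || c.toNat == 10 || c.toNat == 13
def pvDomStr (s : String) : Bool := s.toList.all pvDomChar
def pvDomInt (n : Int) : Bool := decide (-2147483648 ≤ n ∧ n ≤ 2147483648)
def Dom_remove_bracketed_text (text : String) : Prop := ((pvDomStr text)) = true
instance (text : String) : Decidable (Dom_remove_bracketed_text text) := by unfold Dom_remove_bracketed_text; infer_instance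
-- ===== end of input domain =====

-- B replaces A's character-by-character boolean state machine by splitting on ']' and keeping
-- each segment's prefix before its first '[' (objective: faster; a timing run measured B faster at the largest size).

-- ===== PORT A =====
-- A's loop: state (result, inside_brackets), one step per character, in A's branch order.
def removeLoopA : List Char → List Char → Bool → List Char
  | [], result, _ => result
  | c :: cs, result, inside =>
    if c = '[' then removeLoopA cs result true
    else if c = ']' then removeLoopA cs result false
    else if !inside then removeLoopA cs (result ++ [c]) inside
    else removeLoopA cs result inside

def remove_bracketed_text (text : String) : String :=
  String.ofList (removeLoopA text.toList [] false)

-- ===== PORT B =====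
-- port of Source B's text.split(']'): split into segments at each ']' (empties kept, Python-exact)
def splitRB : List Char → List (List Char)
  | [] => [[]]
  | c :: cs =>
    if c = ']' then [] :: splitRB cs
    else
      match splitRB cs with
      | [] => [[c]]          -- unreachable: splitRB never returns []
      | p :: ps => (c :: p) :: ps

-- port of part.partition('[')[0]: the prefix before the first '['
def keepRB (part : List Char) : List Char := part.takeWhile (· ≠ '[')

def remove_bracketed_text_alt (text : String) : String :=
  String.ofList (((splitRB text.toList).map keepRB).flatten)

-- ===== PRECONDITION & SPEC =====
def Spec_remove_bracketed_text (text : String) (out : String) : Prop := out = remove_bracketed_text_alt text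
instance (text : String) (out : String) : Decidable (Spec_remove_bracketed_text text out) := by unfold Spec_remove_bracketed_text; infer_instance

-- ===== CLAIM (what is proved, stated in full; the proofs are below) =====
def Claim_equal_remove_bracketed_text : Prop := ∀ (text : String), Dom_remove_bracketed_text text → Spec_remove_bracketed_text text (remove_bracketed_text text)

-- ===== LEMMAS AND PROOFS =====

theorem splitRB_ne_nil (cs : List Char) : splitRB cs ≠ [] := by
  cases cs with
  | nil => simp [splitRB]
  | cons c cs =>
    simp only [splitRB]
    split
    · simp
    · cases h : splitRB cs <;> simp

-- Loop invariant: from state `inside = false` A produces B's value of the whole rest;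
-- from `inside = true` it produces B's value of the rest after the first ']'.
theorem removeLoopA_eq (cs : List Char) : ∀ (res : List Char),
    removeLoopA cs res false = res ++ ((splitRB cs).map keepRB).flatten ∧
    removeLoopA cs res true = res ++ (((splitRB cs).tail).map keepRB).flatten := by
  induction cs with
  | nil => intro res; simp [removeLoopA, splitRB, keepRB]
  | cons c cs ih =>
    intro res
    obtain ⟨p, ps, hsp⟩ : ∃ p ps, splitRB cs = p :: ps := by
      cases h : splitRB cs with
      | nil => exact absurd h (splitRB_ne_nil cs)
      | cons p ps => exact ⟨p, ps, rfl⟩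
    by_cases hb : c = ']'
    · subst hb
      have h := (ih res).1
      simp [removeLoopA, splitRB, keepRB, h]
    · by_cases ha : c = '['
      · subst ha
        have h := (ih res).2
        simp [removeLoopA, splitRB, hsp, keepRB, h]
      · have h1 := (ih (res ++ [c])).1
        have h2 := (ih res).2
        simp [removeLoopA, splitRB, hsp, keepRB, hb, ha, h1, h2] at *

theorem remove_bracketed_text_spec' (text : String) :
    remove_bracketed_text text = remove_bracketed_text_alt text := by
  unfold remove_bracketed_text remove_bracketed_text_alt
  rw [(removeLoopA_eq text.toList []).1]
  simp

-- ===== VERDICT (by name: the statement is the Claim_ definition above) =====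
theorem remove_bracketed_text_spec : Claim_equal_remove_bracketed_text := by
  intro text _
  exact remove_bracketed_text_spec' text
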